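-- pv_equiv track=rewrite | github.com/PetarMI/thesis-eth | benchmarks/fuzzer/scripts/bench_num_link_ops.py | calc_fr_ops
-- ===== SOURCE A (Python) =====
-- def calc_fr_ops(search_plan: list):
--     drops = 0
--     restores = 0
--
--     last_state = ()
--
--     for state in search_plan:
--         restores += len(last_state)
--         drops += len(state)
--
--         last_state = state
--
--     return drops, restores
-- ===== SOURCE B (Python) =====
-- def calc_fr_ops(search_plan: list):
--     drops = sum(len(state) for state in search_plan)
--     restores = drops - len(search_plan[-1]) if search_plan else 0
--     return drops, restores
-- ===== Notes on version B (the rewrite author's own statement) =====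
-- stated objective: simpler
-- what changed: Replaces the loop that tracks last_state and accumulates two counters with a single sum of lengths plus the arithmetic identity restores = drops - len(last state).
import Mathlib
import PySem

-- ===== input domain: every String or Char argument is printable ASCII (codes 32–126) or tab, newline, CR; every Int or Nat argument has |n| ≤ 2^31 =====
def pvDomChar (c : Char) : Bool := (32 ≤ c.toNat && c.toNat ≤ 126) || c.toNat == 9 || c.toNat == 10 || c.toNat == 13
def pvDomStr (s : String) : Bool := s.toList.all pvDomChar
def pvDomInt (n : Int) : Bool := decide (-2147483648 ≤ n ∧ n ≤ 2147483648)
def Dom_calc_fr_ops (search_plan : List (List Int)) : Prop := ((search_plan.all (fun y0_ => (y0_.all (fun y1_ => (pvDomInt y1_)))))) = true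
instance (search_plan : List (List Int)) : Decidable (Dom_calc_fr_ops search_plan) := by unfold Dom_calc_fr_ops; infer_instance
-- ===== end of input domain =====

-- B replaces A's loop (two counters + last_state tracking) with one sum of lengths
-- and derives restores arithmetically; objective: simpler.

-- ===== PORT A =====
-- A's loop: state (drops, restores, last_state), updated in the loop's order.
def calc_fr_ops (search_plan : List (List Int)) : Int × Int :=
  let r := search_plan.foldl
    (fun (acc : Int × Int × List Int) state =>
      (acc.1 + (state.length : Int), acc.2.1 + (acc.2.2.length : Int), state))
    (0, 0, ([] : List Int))
  (r.1, r.2.1)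

-- ===== PORT B =====
def calc_fr_ops_alt (search_plan : List (List Int)) : Int × Int :=
  let drops : Int := (search_plan.map (fun s => (s.length : Int))).sum
  match search_plan.getLast? with
  | none => (drops, 0)
  | some last => (drops, drops - (last.length : Int))

-- ===== PRECONDITION & SPEC =====
def Spec_calc_fr_ops (search_plan : List (List Int)) (out : Int × Int) : Prop := out = calc_fr_ops_alt search_plan
instance (search_plan : List (List Int)) (out : Int × Int) : Decidable (Spec_calc_fr_ops search_plan out) := by unfold Spec_calc_fr_ops; infer_instance

-- ===== CLAIM (what is proved, stated in full; the proofs are below) =====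
def Claim_equal_calc_fr_ops : Prop := ∀ (search_plan : List (List Int)), Dom_calc_fr_ops search_plan → Spec_calc_fr_ops search_plan (calc_fr_ops search_plan)

-- ===== LEMMAS AND PROOFS =====

theorem calc_fr_ops_foldl_inv (sp : List (List Int)) (d r : Int) (last : List Int) :
    sp.foldl
      (fun (acc : Int × Int × List Int) state =>
        (acc.1 + (state.length : Int), acc.2.1 + (acc.2.2.length : Int), state))
      (d, r, last)
    = (d + (sp.map (fun s => (s.length : Int))).sum,
       r + (if sp.isEmpty then 0
            else (last.length : Int) + (sp.map (fun s => (s.length : Int))).sum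
                 - ((sp.getLastD last).length : Int)),
       sp.getLastD last) := by
  induction sp generalizing d r last with
  | nil => simp
  | cons x xs ih =>
    simp only [List.foldl_cons, ih]
    rcases xs with _ | ⟨y, ys⟩
    · simp
    · cases hz : (y :: ys).getLast? with
      | none => simp at hz
      | some z =>
        simp [List.getLastD_eq_getLast?, hz]
        constructor <;> ring

theorem calc_fr_ops_spec' (sp : List (List Int)) : calc_fr_ops sp = calc_fr_ops_alt sp := by
  unfold calc_fr_ops calc_fr_ops_alt
  rw [calc_fr_ops_foldl_inv]
  rcases h : sp.getLast? with _ | last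
  · simp [List.getLast?_eq_none_iff.mp h]
  · have hne : sp ≠ [] := by
      intro e; subst e; simp at h
    simp [List.getLastD_eq_getLast?, h, hne, List.isEmpty_iff]

-- ===== VERDICT (by name: the statement is the Claim_ definition above) =====
theorem calc_fr_ops_spec : Claim_equal_calc_fr_ops := by
  intro sp _
  unfold Spec_calc_fr_ops
  exact calc_fr_ops_spec' sp
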